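-- pv_equiv track=rewrite | github.com/Dev-ERAK/PythonPraticeCode | Daily Classes/01..04.2022/Amazing Subarrays.py | solve
-- ===== SOURCE A (Python) =====
-- def solve(A):
--     N = len(A)
--
--     ans = 0
--
--     for i in range(N):
--         if A[i] == 'a' or A[i] == 'A' or A[i] == 'E' or A[i] == 'e' or A[i] == 'I' or A[i] == 'i' or A[i] == 'O' or \
--                 A[i] == 'o' or A[i] == 'U' or A[i] == 'u':
--             ans += (N - i)
--
--     return ans % 10003
-- ===== SOURCE B (Python) =====
-- def solve(A):
--     vcount = 0
--     ans = 0
--     for ch in A: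
--         if ch in "aeiouAEIOU":
--             vcount += 1
--         ans += vcount
--     return ans % 10003
-- ===== Notes on version B (the rewrite author's own statement) =====
-- stated objective: alternative
-- what changed: Replaces A's per-vowel (N-i) contributions indexed over range(N) with a single forward pass accumulating a running prefix vowel count into the answer.
import Mathlib
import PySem

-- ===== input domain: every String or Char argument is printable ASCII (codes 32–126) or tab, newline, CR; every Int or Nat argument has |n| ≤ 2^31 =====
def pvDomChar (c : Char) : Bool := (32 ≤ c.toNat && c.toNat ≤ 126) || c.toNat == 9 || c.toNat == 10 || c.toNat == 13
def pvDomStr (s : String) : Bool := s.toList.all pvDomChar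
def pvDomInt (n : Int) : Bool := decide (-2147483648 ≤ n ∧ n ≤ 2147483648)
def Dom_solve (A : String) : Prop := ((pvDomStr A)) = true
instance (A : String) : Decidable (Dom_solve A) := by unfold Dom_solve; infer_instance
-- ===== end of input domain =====

-- B replaces A's per-vowel (N-i) contributions over range(N) with one forward pass
-- accumulating a running prefix vowel count (objective: alternative decomposition, same cost).

-- ===== PORT A =====
-- A's vowel test, in A's branch order
def vowelA (c : Char) : Bool :=
  c == 'a' || c == 'A' || c == 'E' || c == 'e' || c == 'I' || c == 'i' ||
  c == 'O' || c == 'o' || c == 'U' || c == 'u'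

def solve (A : String) : Int :=
  let l := A.toList
  let N : Int := PySem.Str.len A
  let ans : Int := (PySem.List.pyRange 0 N 1).foldl
    (fun ans i => if vowelA (PySem.List.pyGetD l i ' ') then ans + (N - i) else ans) 0
  PySem.Int.mod ans 10003

-- ===== PORT B =====
-- B's loop body: state (vcount, ans); 'ch in "aeiouAEIOU"' is Python substring membership of the 1-char string
def stepB (s : Int × Int) (ch : Char) : Int × Int :=
  let v := if PySem.Chars.isIn [ch] "aeiouAEIOU".toList then s.1 + 1 else s.1
  (v, s.2 + v)

def solve_alt (A : String) : Int :=
  let p := A.toList.foldl stepB (0, 0)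
  PySem.Int.mod p.2 10003

-- ===== PRECONDITION & SPEC =====
def Spec_solve (A : String) (out : Int) : Prop := out = solve_alt A
instance (A : String) (out : Int) : Decidable (Spec_solve A out) := by unfold Spec_solve; infer_instance

-- ===== CLAIM (what is proved, stated in full; the proofs are below) =====
def Claim_equal_solve : Prop := ∀ (A : String), Dom_solve A → Spec_solve A (solve A)

-- ===== LEMMAS AND PROOFS =====

-- B's membership test is A's chained comparison
theorem vowel_isIn (c : Char) : PySem.Chars.isIn [c] "aeiouAEIOU".toList = vowelA c := by
  rw [← Bool.coe_iff_coe, PySem.Chars.isIn_iff_infix, List.singleton_infix_iff,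
    show "aeiouAEIOU".toList = ['a','e','i','o','u','A','E','I','O','U'] from by decide]
  simp [vowelA]
  tauto

-- the common value both folds compute (before the mod): each vowel contributes (suffix length)
def vSum : List Char → Int
  | [] => 0
  | c :: t => (if vowelA c then ((t.length : Int) + 1) else 0) + vSum t

theorem A_fold_nat (l : List Char) (a : Int) :
    (List.range l.length).foldl
      (fun ans k => if vowelA (l.getD k ' ') then ans + ((l.length : Int) - (k : Int)) else ans) a
    = a + vSum l := by
  induction l generalizing a with
  | nil => simp [vSum]
  | cons c t ih =>
    rw [List.length_cons, List.range_succ_eq_map]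
    simp only [List.foldl_cons, List.foldl_map, List.getD_cons_zero, List.getD_cons_succ]
    have hb : (fun (x : Int) (y : Nat) =>
        if vowelA (t.getD y ' ') then x + ((((t.length + 1 : Nat)) : Int) - (y.succ : Int)) else x)
        = fun (ans : Int) (k : Nat) =>
        if vowelA (t.getD k ' ') then ans + ((t.length : Int) - (k : Int)) else ans := by
      funext x y
      split_ifs with hv
      · push_cast [Nat.succ_eq_add_one]; ring
      · rfl
    rw [hb, ih, vSum]
    split_ifs <;> push_cast <;> ring

theorem B_fold (l : List Char) (v a : Int) :
    (l.foldl stepB (v, a)).2 = a + v * l.length + vSum l := by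
  induction l generalizing v a with
  | nil => simp [vSum]
  | cons c t ih =>
    rw [List.foldl_cons]
    show (t.foldl stepB (stepB (v, a) c)).2 = _
    simp only [stepB, vowel_isIn]
    rw [show (let w := if vowelA c then (v, a).1 + 1 else (v, a).1; (w, (v, a).2 + w))
        = ((if vowelA c then v + 1 else v), a + (if vowelA c then v + 1 else v)) from rfl]
    rw [ih, vSum, List.length_cons]
    split_ifs <;> push_cast <;> ring

-- ===== VERDICT (by name: the statement is the Claim_ definition above) =====
theorem solve_spec : Claim_equal_solve := by
  intro A _
  unfold Spec_solve solve solve_alt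
  simp only [PySem.Str.len_eq, PySem.List.pyRange_zero_natCast, List.foldl_map,
    PySem.List.pyGetD_natCast, B_fold]
  rw [A_fold_nat]
  simp
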